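-- pv_equiv track=rewrite | github.com/chasefinch/cutesy | cutesy/attribute_processors/class_ordering/tailwind.py | _spacing_specificity
-- ===== SOURCE A (Python) =====
-- _SPACING_AXIS = ("x", "y")
--
-- _SPACING_SIDES = ("t", "b", "r", "l", "s", "e")
--
-- def _spacing_specificity(name: str) -> int:
--     # p- / m- < px-/py-/mx-/my- < pt-/pr-/.../ml-
--     if name.startswith(("p-", "m-")):
--         return 0
--     if any(name.startswith((f"p{axis}-", f"m{axis}-")) for axis in _SPACING_AXIS):
--         return 1
--     if any(name.startswith((f"p{side}-", f"m{side}-")) for side in _SPACING_SIDES):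
--         return 2
--     return 0
-- ===== SOURCE B (Python) =====
-- _SPACING_AXIS = ("x", "y")
--
-- _SPACING_SIDES = ("t", "b", "r", "l", "s", "e")
--
--
-- def _spacing_specificity(name: str) -> int:
--     # Split off the prefix token once and dispatch on its characters.
--     head, sep, _ = name.partition("-")
--     if not sep:
--         return 0
--     if head in ("p", "m"):
--         return 0
--     if len(head) == 2 and head[0] in ("p", "m"):
--         if head[1] in _SPACING_AXIS:
--             return 1
--         if head[1] in _SPACING_SIDES:
--             return 2
--     return 0
-- ===== Notes on version B (the rewrite author's own statement) =====
-- stated objective: simpler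
-- what changed: B splits the name at the first '-' once (partition) and classifies from the extracted head token's characters, instead of A's chain of startswith scans over f-string-built prefixes for every axis and side.
import Mathlib
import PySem

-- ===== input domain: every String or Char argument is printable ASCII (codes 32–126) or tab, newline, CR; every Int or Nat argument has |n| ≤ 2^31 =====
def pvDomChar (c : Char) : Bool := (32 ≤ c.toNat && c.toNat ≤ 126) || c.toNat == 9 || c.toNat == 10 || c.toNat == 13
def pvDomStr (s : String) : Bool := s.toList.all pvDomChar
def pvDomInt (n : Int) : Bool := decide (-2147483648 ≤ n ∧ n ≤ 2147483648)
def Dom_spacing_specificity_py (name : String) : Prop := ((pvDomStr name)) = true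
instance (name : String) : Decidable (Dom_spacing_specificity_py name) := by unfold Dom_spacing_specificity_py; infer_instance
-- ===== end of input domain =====

-- B splits the name once at the first '-' (partition) and classifies from the head token's
-- characters, replacing A's chain of startswith scans (objective: simpler).

-- ===== PORT A =====
def spacing_specificity_py (name : String) : Int :=
  if PySem.Str.startswith name "p-" || PySem.Str.startswith name "m-" then 0
  else if ["x", "y"].any (fun axis =>
      PySem.Str.startswith name ("p" ++ axis ++ "-") || PySem.Str.startswith name ("m" ++ axis ++ "-")) then 1
  else if ["t", "b", "r", "l", "s", "e"].any (fun side =>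
      PySem.Str.startswith name ("p" ++ side ++ "-") || PySem.Str.startswith name ("m" ++ side ++ "-")) then 2
  else 0

-- ===== PORT B =====
-- hand port of str.partition("-"), restricted to what B uses:
-- (the text before the first '-', whether a '-' was found); exact on all inputs
def pvPartHead : List Char → List Char × Bool
  | [] => ([], false)
  | c :: t =>
    if c = '-' then ([], true)
    else
      let r := pvPartHead t
      (c :: r.1, r.2)

def spacing_specificity_py_alt (name : String) : Int :=
  let p := pvPartHead name.toList
  if !p.2 then 0
  else if p.1 = ['p'] ∨ p.1 = ['m'] then 0
  else
    match p.1 with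
    | [c0, c1] =>
      if c0 = 'p' ∨ c0 = 'm' then
        if c1 = 'x' ∨ c1 = 'y' then 1
        else if c1 = 't' ∨ c1 = 'b' ∨ c1 = 'r' ∨ c1 = 'l' ∨ c1 = 's' ∨ c1 = 'e' then 2
        else 0
      else 0
    | _ => 0

-- ===== PRECONDITION & SPEC =====
def Spec_spacing_specificity_py (name : String) (out : Int) : Prop := out = spacing_specificity_py_alt name
instance (name : String) (out : Int) : Decidable (Spec_spacing_specificity_py name out) := by unfold Spec_spacing_specificity_py; infer_instance

-- ===== CLAIM (what is proved, stated in full; the proofs are below) =====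
def Claim_equal_spacing_specificity_py : Prop := ∀ (name : String), Dom_spacing_specificity_py name → Spec_spacing_specificity_py name (spacing_specificity_py name)

-- ===== LEMMAS AND PROOFS =====

-- B's dispatch, phrased over the character list (definitionally spacing_specificity_py_alt ∘ String.toList)
def pvAltList (l : List Char) : Int :=
  let p := pvPartHead l
  if !p.2 then 0
  else if p.1 = ['p'] ∨ p.1 = ['m'] then 0
  else
    match p.1 with
    | [c0, c1] =>
      if c0 = 'p' ∨ c0 = 'm' then
        if c1 = 'x' ∨ c1 = 'y' then 1
        else if c1 = 't' ∨ c1 = 'b' ∨ c1 = 'r' ∨ c1 = 'l' ∨ c1 = 's' ∨ c1 = 'e' then 2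
        else 0
      else 0
    | _ => 0

-- the heart of the equivalence: A's prefix tests and B's partition dispatch agree on every character list
theorem pv_keyL (l : List Char) :
    (if PySem.Chars.startswith l ['p','-'] || PySem.Chars.startswith l ['m','-'] then (0:Int)
     else if ["x", "y"].any (fun axis =>
        PySem.Chars.startswith l ('p' :: axis.toList ++ ['-']) || PySem.Chars.startswith l ('m' :: axis.toList ++ ['-'])) then 1
     else if ["t", "b", "r", "l", "s", "e"].any (fun side =>
        PySem.Chars.startswith l ('p' :: side.toList ++ ['-']) || PySem.Chars.startswith l ('m' :: side.toList ++ ['-'])) then 2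
     else 0) = pvAltList l := by
  unfold pvAltList
  rcases l with _ | ⟨a, _ | ⟨b, _ | ⟨c, t⟩⟩⟩
  · simp [pvPartHead, PySem.Chars.startswith]
  · simp only [pvPartHead, PySem.Chars.startswith, List.isPrefixOf, List.any]
    by_cases ha : a = '-' <;> simp [ha]
  · simp only [pvPartHead, PySem.Chars.startswith, List.isPrefixOf, List.any]
    by_cases ha : a = '-' <;> by_cases hb : b = '-' <;> simp [ha, hb]
  · simp only [pvPartHead, PySem.Chars.startswith, List.isPrefixOf, List.any]
    by_cases ha : a = '-' <;> by_cases hb : b = '-' <;> by_cases hc : c = '-' <;>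
      simp [ha, hb, hc] <;> split_ifs <;> simp_all [eq_comm] <;> aesop

theorem pv_key (name : String) : spacing_specificity_py name = spacing_specificity_py_alt name := by
  have h := pv_keyL name.toList
  unfold spacing_specificity_py spacing_specificity_py_alt
  simp only [PySem.Str.startswith_eq]
  convert h using 3

-- ===== VERDICT (by name: the statement is the Claim_ definition above) =====
theorem spacing_specificity_py_spec : Claim_equal_spacing_specificity_py := by
  intro name _
  unfold Spec_spacing_specificity_py
  exact pv_key name
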